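-- pv_equiv track=rewrite | github.com/Alex-Men-VL/projects-automation-bot | telegram_bot/management/commands/sort.py | chunk_students_by_skill
-- ===== SOURCE A (Python) =====
-- def chunk_students_by_skill(students):
--     novice, novice_plus, junior = [], [], []
--
--     for student in students:
--         if student['level'] == 'junior':
--             junior.append(student)
--
--         if student['level'] == 'novice+':
--             novice_plus.append(student)
--
--         if student['level'] == 'novice':
--             novice.append(student)
--
--     return junior, novice_plus, novice
-- ===== SOURCE B (Python) =====
-- def chunk_students_by_skill(students):
--     def by_level(level):
--         return [s for s in students if s['level'] == level]
--     return by_level('junior'), by_level('novice+'), by_level('novice')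
-- ===== Notes on version B (the rewrite author's own statement) =====
-- stated objective: idiomatic
-- what changed: Replaces the single loop with three mutable accumulators and a three-way branch by three declarative filter comprehensions, one per level, returned directly in order.
import Mathlib
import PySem

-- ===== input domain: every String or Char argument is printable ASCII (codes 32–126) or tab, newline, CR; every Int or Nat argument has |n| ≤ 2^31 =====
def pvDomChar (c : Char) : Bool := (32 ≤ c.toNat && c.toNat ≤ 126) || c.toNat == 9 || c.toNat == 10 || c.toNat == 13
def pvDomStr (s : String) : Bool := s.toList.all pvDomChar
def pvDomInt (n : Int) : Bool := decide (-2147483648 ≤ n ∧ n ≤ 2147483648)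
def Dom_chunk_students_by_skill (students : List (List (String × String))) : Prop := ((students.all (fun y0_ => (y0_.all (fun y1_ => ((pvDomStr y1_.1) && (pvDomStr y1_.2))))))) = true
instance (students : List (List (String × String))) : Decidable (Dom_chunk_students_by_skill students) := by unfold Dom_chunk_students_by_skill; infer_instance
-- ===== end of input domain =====

-- B replaces A's one loop with three mutable accumulators and a three-way branch by
-- three declarative filters, one per level (idiomatic; same O(n) cost).
-- ===== PORT A =====
-- student['level']; under Pre_ the key exists, so the default is never used
def pvLevelA (student : List (String × String)) : String :=
  (PySem.Dict.mk student).getD "level" ""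

def chunk_students_by_skill (students : List (List (String × String))) : (List (List (String × String))) × (List (List (String × String))) × (List (List (String × String))) :=
  let st := students.foldl
    (fun (acc : List (List (String × String)) × List (List (String × String)) × List (List (String × String))) student =>
      let novice := acc.1
      let novice_plus := acc.2.1
      let junior := acc.2.2
      let junior := if pvLevelA student == "junior" then junior ++ [student] else junior
      let novice_plus := if pvLevelA student == "novice+" then novice_plus ++ [student] else novice_plus
      let novice := if pvLevelA student == "novice" then novice ++ [student] else novice
      (novice, novice_plus, junior))
    ([], [], [])
  (st.2.2, st.2.1, st.1)

-- ===== PORT B =====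
def pvByLevel (students : List (List (String × String))) (level : String) : List (List (String × String)) :=
  students.filter (fun s => (PySem.Dict.mk s).getD "level" "" == level)

def chunk_students_by_skill_alt (students : List (List (String × String))) : (List (List (String × String))) × (List (List (String × String))) × (List (List (String × String))) :=
  (pvByLevel students "junior", pvByLevel students "novice+", pvByLevel students "novice")

-- ===== PRECONDITION & SPEC =====
-- Pre_ excludes students missing the 'level' key, on which A raises KeyError.
def Pre_chunk_students_by_skill (students : List (List (String × String))) : Prop :=
  ∀ s ∈ students, (PySem.Dict.mk s).contains "level" = true
instance (students : List (List (String × String))) : Decidable (Pre_chunk_students_by_skill students) := by unfold Pre_chunk_students_by_skill; infer_instance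

def pvWitness_chunk_students_by_skill : (List (List (String × String))) :=
  [[("level", "junior"), ("name", "a")], [("level", "novice")]]

def Spec_chunk_students_by_skill (students : List (List (String × String))) (out : (List (List (String × String))) × (List (List (String × String))) × (List (List (String × String)))) : Prop := out = chunk_students_by_skill_alt students
instance (students : List (List (String × String))) (out : (List (List (String × String))) × (List (List (String × String))) × (List (List (String × String)))) : Decidable (Spec_chunk_students_by_skill students out) := by unfold Spec_chunk_students_by_skill; infer_instance

-- ===== CLAIM (what is proved, stated in full; the proofs are below) =====
def Claim_equal_chunk_students_by_skill : Prop := ∀ (students : List (List (String × String))), Dom_chunk_students_by_skill students → Pre_chunk_students_by_skill students → Spec_chunk_students_by_skill students (chunk_students_by_skill students)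

-- ===== LEMMAS AND PROOFS =====
lemma chunk_loop (students : List (List (String × String)))
    (n p j : List (List (String × String))) :
    students.foldl
      (fun (acc : List (List (String × String)) × List (List (String × String)) × List (List (String × String))) student =>
        let novice := acc.1
        let novice_plus := acc.2.1
        let junior := acc.2.2
        let junior := if pvLevelA student == "junior" then junior ++ [student] else junior
        let novice_plus := if pvLevelA student == "novice+" then novice_plus ++ [student] else novice_plus
        let novice := if pvLevelA student == "novice" then novice ++ [student] else novice
        (novice, novice_plus, junior))
      (n, p, j)
    = (n ++ pvByLevel students "novice", p ++ pvByLevel students "novice+", j ++ pvByLevel students "junior") := by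
  induction students generalizing n p j with
  | nil => simp [pvByLevel]
  | cons s rest ih =>
    simp only [List.foldl_cons, ih]
    simp [pvByLevel, pvLevelA, List.filter_cons]
    split_ifs <;> simp_all

-- ===== VERDICT (by name: the statement is the Claim_ definition above) =====
theorem chunk_students_by_skill_spec : Claim_equal_chunk_students_by_skill := by
  intro students _ _
  unfold Spec_chunk_students_by_skill chunk_students_by_skill chunk_students_by_skill_alt
  simp only [chunk_loop]
  simp
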